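-- pv_equiv track=rewrite | github.com/angr/patcherex | patcherex/techniques/uninitialized_patcher.py | _make_groups
-- ===== SOURCE A (Python) =====
-- def _make_groups(vals, step=-4):
--     """Return list of consecutive lists of numbers from vals (number list)."""
--     run = []
--     result = [run]
--     expect = None
--     for v in vals:
--         if (v == expect) or (expect is None):
--             run.append(v)
--         else:
--             run = [v]
--             result.append(run)
--         expect = v + step
--     return result
-- ===== SOURCE B (Python) =====
-- def _make_groups(vals, step=-4):
--     """Two-stage: collect break indices in one pass, then slice vals at them."""
--     n = len(vals)
--     breaks = [i for i in range(1, n) if vals[i] != vals[i - 1] + step]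
--     result = []
--     start = 0
--     for b in breaks + [n]:
--         result.append(vals[start:b])
--         start = b
--     return result
-- ===== Notes on version B (the rewrite author's own statement) =====
-- stated objective: alternative
-- what changed: Replaces the element-by-element loop that appends into a mutated current run with a two-stage decomposition: one pass collecting break indices (where vals[i] != vals[i-1]+step), then a slicing pass cutting vals at those indices.
import Mathlib
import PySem

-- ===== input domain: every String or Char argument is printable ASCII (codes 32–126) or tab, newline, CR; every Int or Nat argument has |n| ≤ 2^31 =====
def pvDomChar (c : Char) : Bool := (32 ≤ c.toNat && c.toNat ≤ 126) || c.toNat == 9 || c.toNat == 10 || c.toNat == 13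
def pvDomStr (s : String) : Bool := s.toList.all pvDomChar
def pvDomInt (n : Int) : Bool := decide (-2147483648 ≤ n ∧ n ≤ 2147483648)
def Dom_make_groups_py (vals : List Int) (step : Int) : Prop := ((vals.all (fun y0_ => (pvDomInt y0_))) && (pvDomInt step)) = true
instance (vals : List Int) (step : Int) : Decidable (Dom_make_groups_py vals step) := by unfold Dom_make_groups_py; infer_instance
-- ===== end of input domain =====

-- B replaces A's append-into-a-mutated-run loop by a two-stage break-index-then-slice decomposition (objective: alternative).

-- ===== PORT A =====
-- A's `result` holds an alias of the mutable `run` as its last element; the loop state is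
-- modelled as (finished groups, current run, expect), with result = finished ++ [run].
def mkgALoop (step : Int) (vs : List Int) (fin : List (List Int)) (run : List Int) (expect : Option Int) : List (List Int) :=
  match vs with
  | [] => fin ++ [run]
  | v :: rest =>
    if some v = expect ∨ expect = none then
      mkgALoop step rest fin (run ++ [v]) (some (v + step))
    else
      mkgALoop step rest (fin ++ [run]) [v] (some (v + step))

def make_groups_py (vals : List Int) (step : Int) : List (List Int) :=
  mkgALoop step vals [] [] none

-- ===== PORT B =====
-- transliteration of Source B; every index i is in range(1, n), so pyGetD with default 0 is exact there.
def make_groups_py_alt (vals : List Int) (step : Int) : List (List Int) :=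
  let n : Int := vals.length
  let breaks : List Int := (PySem.List.pyRange 1 n 1).filter
    (fun i => decide (PySem.List.pyGetD vals i 0 ≠ PySem.List.pyGetD vals (i - 1) 0 + step))
  ((breaks ++ [n]).foldl
    (fun (acc : List (List Int) × Int) b =>
      (acc.1 ++ [PySem.List.slice vals (some acc.2) (some b)], b))
    ([], 0)).1

-- ===== PRECONDITION & SPEC =====
def Spec_make_groups_py (vals : List Int) (step : Int) (out : List (List Int)) : Prop := out = make_groups_py_alt vals step
instance (vals : List Int) (step : Int) (out : List (List Int)) : Decidable (Spec_make_groups_py vals step out) := by unfold Spec_make_groups_py; infer_instance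

-- ===== CLAIM (what is proved, stated in full; the proofs are below) =====
def Claim_equal_make_groups_py : Prop := ∀ (vals : List Int) (step : Int), Dom_make_groups_py vals step → Spec_make_groups_py vals step (make_groups_py vals step)

-- ===== LEMMAS AND PROOFS =====

-- canonical one-group-at-a-time form of A's loop
def chunkFrom (step : Int) (run : List Int) (e : Int) : List Int → List (List Int)
  | [] => [run]
  | v :: vs => if v = e then chunkFrom step (run ++ [v]) (v + step) vs
               else run :: chunkFrom step [v] (v + step) vs

theorem mkgALoop_eq_chunkFrom (step : Int) (vs : List Int) :
    ∀ (fin : List (List Int)) (run : List Int) (e : Int),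
    mkgALoop step vs fin run (some e) = fin ++ chunkFrom step run e vs := by
  induction vs with
  | nil => intro fin run e; simp [mkgALoop, chunkFrom]
  | cons v rest ih =>
    intro fin run e
    by_cases h : v = e
    · simp [mkgALoop, chunkFrom, h, ih]
    · simp [mkgALoop, chunkFrom, h, ih]

theorem chunkFrom_cons_run (step : Int) (xs : List Int) :
    ∀ (x : Int) (run : List Int) (e : Int),
    chunkFrom step (x :: run) e xs = (chunkFrom step run e xs).modifyHead (x :: ·) := by
  induction xs with
  | nil => intro x run e; simp [chunkFrom]
  | cons v vs ih =>
    intro x run e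
    by_cases h : v = e
    · simp [chunkFrom, h, ih]
    · simp [chunkFrom, h]

-- B's slicing pass, as a recursion over the Nat cut points
def slicesN (vals : List Int) (s : Nat) : List Nat → List (List Int)
  | [] => []
  | b :: bs => (vals.drop s).take (b - s) :: slicesN vals b bs

theorem foldl_slices (vals : List Int) :
    ∀ (cs : List Nat) (acc : List (List Int)) (s : Nat),
    ((cs.map (Int.ofNat)).foldl
      (fun (acc : List (List Int) × Int) b =>
        (acc.1 ++ [PySem.List.slice vals (some acc.2) (some b)], b))
      (acc, (s : Int))).1 = acc ++ slicesN vals s cs := by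
  intro cs
  induction cs with
  | nil => intro acc s; simp [slicesN]
  | cons b bs ih =>
    intro acc s
    simp only [List.map_cons, List.foldl_cons, slicesN]
    rw [show Int.ofNat b = ((b : Nat) : Int) from rfl,
        PySem.List.slice_natCast, ih]
    simp

-- Nat-indexed break condition and break list
def bcond (vals : List Int) (step : Int) (i : Nat) : Bool :=
  decide (vals.getD i 0 ≠ vals.getD (i - 1) 0 + step)

def bksAll (vals : List Int) (step : Int) : List Nat :=
  ((List.range (vals.length - 1)).map (· + 1)).filter (bcond vals step) ++ [vals.length]

theorem bksAll_ne_nil (vals : List Int) (step : Int) : bksAll vals step ≠ [] := by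
  simp [bksAll]

-- the port's break list is bksAll (cast to Int) with the final length appended
theorem alt_eq_slicesN (vals : List Int) (step : Int) :
    make_groups_py_alt vals step = slicesN vals 0 (bksAll vals step) := by
  unfold make_groups_py_alt bksAll
  show ((((PySem.List.pyRange 1 (vals.length : Int) 1).filter
      (fun i => decide (PySem.List.pyGetD vals i 0 ≠ PySem.List.pyGetD vals (i - 1) 0 + step))
      ++ [(vals.length : Int)]).foldl
      (fun (acc : List (List Int) × Int) b =>
        (acc.1 ++ [PySem.List.slice vals (some acc.2) (some b)], b))
      ([], 0)).1) = _
  rw [PySem.List.pyRange_one 1 (vals.length : Int)]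
  have h1 : ((vals.length : Int) - 1).toNat = vals.length - 1 := by omega
  rw [h1]
  have h2 : (List.range (vals.length - 1)).map (fun k : Nat => (1 : Int) + (k : Int))
      = ((List.range (vals.length - 1)).map (· + 1)).map Int.ofNat := by
    rw [List.map_map]
    apply List.map_congr_left
    intro a _
    show (1 : Int) + a = ((a + 1 : Nat) : Int)
    push_cast
    omega
  rw [h2, List.filter_map]
  have h3 : ∀ i ∈ (List.range (vals.length - 1)).map (· + 1),
      ((fun i => decide (PySem.List.pyGetD vals i 0 ≠ PySem.List.pyGetD vals (i - 1) 0 + step)) ∘ Int.ofNat) i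
        = bcond vals step i := by
    intro i hi
    simp only [List.mem_map, List.mem_range] at hi
    obtain ⟨k, _, rfl⟩ := hi
    simp only [Function.comp, bcond, Nat.add_sub_cancel]
    have e : (Int.ofNat (k + 1)) - 1 = ((k : Nat) : Int) := by simp
    rw [e, show Int.ofNat (k + 1) = ((k + 1 : Nat) : Int) from rfl,
        PySem.List.pyGetD_natCast, PySem.List.pyGetD_natCast]
  rw [List.filter_congr h3]
  have h4 : (((List.range (vals.length - 1)).map (· + 1)).filter (bcond vals step)).map Int.ofNat
        ++ [(vals.length : Int)]
      = ((((List.range (vals.length - 1)).map (· + 1)).filter (bcond vals step)) ++ [vals.length]).map Int.ofNat := by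
    simp
  rw [h4]
  have := foldl_slices vals ((((List.range (vals.length - 1)).map (· + 1)).filter (bcond vals step)) ++ [vals.length]) [] 0
  simpa using this

-- shift lemmas
theorem slicesN_shift (v : Int) (xs : List Int) :
    ∀ (cs : List Nat) (s : Nat),
    slicesN (v :: xs) (s + 1) (cs.map (· + 1)) = slicesN xs s cs := by
  intro cs
  induction cs with
  | nil => intro s; simp [slicesN]
  | cons b bs ih => intro s; simp [slicesN, ih]

theorem slicesN_cons_shift (v : Int) (xs : List Int) (cs : List Nat) (h : cs ≠ []) :
    slicesN (v :: xs) 0 (cs.map (· + 1)) = (slicesN xs 0 cs).modifyHead (v :: ·) := by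
  cases cs with
  | nil => exact absurd rfl h
  | cons b bs =>
    simp only [List.map_cons, slicesN]
    rw [show (b + 1 : Nat) = b + 1 from rfl, slicesN_shift]
    simp

theorem bcond_cons_shift (v : Int) (xs : List Int) (step : Int) (i : Nat) (hi : 1 ≤ i) :
    bcond (v :: xs) step (i + 1) = bcond xs step i := by
  unfold bcond
  have h1 : (v :: xs).getD (i + 1) 0 = xs.getD i 0 := by simp [List.getD]
  have h2 : (v :: xs).getD (i + 1 - 1) 0 = xs.getD (i - 1) 0 := by
    have : i + 1 - 1 = (i - 1) + 1 := by omega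
    rw [this]; simp [List.getD]
  rw [h1, h2]

theorem bksAll_cons_cons (v w : Int) (ws : List Int) (step : Int) :
    bksAll (v :: w :: ws) step
      = (if bcond (v :: w :: ws) step 1 then [1] else [])
        ++ (bksAll (w :: ws) step).map (· + 1) := by
  unfold bksAll
  have hlen : (v :: w :: ws).length - 1 = (w :: ws).length := by simp
  rw [hlen]
  have hr : List.range (w :: ws).length
      = 0 :: (List.range ((w :: ws).length - 1)).map (· + 1) := by
    have : (w :: ws).length = ((w :: ws).length - 1) + 1 := by simp
    rw [this, List.range_succ_eq_map]
    simp
  rw [hr]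
  simp only [List.map_cons, List.map_map, List.filter_cons]
  -- rewrite the filtered tail as a shifted copy of the tail for (w :: ws)
  have key : ((List.range ((w :: ws).length - 1)).map ((· + 1) ∘ (· + 1))).filter (bcond (v :: w :: ws) step)
      = (((List.range ((w :: ws).length - 1)).map (· + 1)).filter (bcond (w :: ws) step)).map (· + 1) := by
    rw [show (List.range ((w :: ws).length - 1)).map ((· + 1) ∘ (· + 1))
        = (((List.range ((w :: ws).length - 1)).map (· + 1)).map (· + 1)) from by simp [List.map_map],
      List.filter_map]
    congr 1
    apply List.filter_congr
    intro i hi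
    simp only [List.mem_map, List.mem_range] at hi
    obtain ⟨k, _, rfl⟩ := hi
    exact (bcond_cons_shift v (w :: ws) step (k + 1) (by omega)).symm
  rw [key]
  by_cases hb : bcond (v :: w :: ws) step 1
  · simp [hb]
  · simp [hb]

theorem main_lemma (step : Int) (vals : List Int) :
    ∀ (v : Int), slicesN (v :: vals) 0 (bksAll (v :: vals) step)
      = chunkFrom step [v] (v + step) vals := by
  induction vals with
  | nil =>
    intro v
    simp [bksAll, slicesN, chunkFrom]
  | cons w ws ih =>
    intro v
    rw [bksAll_cons_cons]
    have hb1 : bcond (v :: w :: ws) step 1 = decide (w ≠ v + step) := by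
      simp [bcond, List.getD]
    by_cases h : w = v + step
    · -- no break after v: first group of the tail gains v in front
      have hb : bcond (v :: w :: ws) step 1 = false := by rw [hb1]; simp [h]
      simp only [hb, Bool.false_eq_true, if_false, List.nil_append]
      rw [slicesN_cons_shift v (w :: ws) _ (bksAll_ne_nil _ _), ih w,
        ← chunkFrom_cons_run]
      simp [chunkFrom, h]
    · -- break at index 1: [v] is its own group
      have hb : bcond (v :: w :: ws) step 1 = true := by rw [hb1]; simp [h]
      simp only [hb, if_true, List.singleton_append]
      simp only [slicesN]
      have hsh : slicesN (v :: w :: ws) 1 ((bksAll (w :: ws) step).map (· + 1))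
          = slicesN (w :: ws) 0 (bksAll (w :: ws) step) :=
        slicesN_shift v (w :: ws) (bksAll (w :: ws) step) 0
      rw [hsh, ih w]
      simp [chunkFrom, h]

-- ===== VERDICT (by name: the statement is the Claim_ definition above) =====
theorem make_groups_py_spec : Claim_equal_make_groups_py := by
  intro vals step _
  unfold Spec_make_groups_py
  rw [alt_eq_slicesN]
  cases vals with
  | nil => simp [make_groups_py, mkgALoop, bksAll, slicesN]
  | cons v vs =>
    rw [main_lemma]
    have h0 : make_groups_py (v :: vs) step = mkgALoop step vs [] [v] (some (v + step)) := by
      simp [make_groups_py, mkgALoop]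
    rw [h0, mkgALoop_eq_chunkFrom]
    simp
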